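-- pv_equiv track=rewrite | github.com/Cormac-C/grpo-project | dataset/countdown_utils.py | search
-- ===== SOURCE A (Python) =====
-- from typing import List, Tuple, Dict, Optional
-- import itertools
--
-- def combine_nums(a: int, b: int) -> List[Tuple[int, str]]:
--     """
--     Given two integers, return all valid results from applying
--     arithmetic operations (addition, subtraction, multiplication, division)
--     along with their string representations.
--
--     Only performs integer division when it divides evenly.
--     """
--     results = [(a + b, f"{a} + {b} = {a + b}"), (a * b, f"{a} * {b} = {a * b}")]
--
--     if a <= b:
--         results.append((b - a, f"{b} - {a} = {b - a}"))
--         if a != 0 and b % a == 0: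
--             results.append((b // a, f"{b} / {a} = {b // a}"))
--     else:
--         results.append((a - b, f"{a} - {b} = {a - b}"))
--         if b != 0 and a % b == 0:
--             results.append((a // b, f"{a} / {b} = {a // b}"))
--
--     return results
--
-- def search(
--     target: int, nums: List[int], operations: List[str] = []
-- ) -> Optional[List[str]]:
--     """
--     Recursively searches for a sequence of arithmetic operations on `nums`
--     that results in the target value.
--
--     Returns a list of operation strings if a valid solution is found,
--     otherwise None.
--     """
--     if len(nums) == 1:
--         return operations if nums[0] == target else None
--
--     for i, j in itertools.combinations(range(len(nums)), 2):
--         num1, num2 = nums[i], nums[j]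
--         remaining_nums = [nums[k] for k in range(len(nums)) if k != i and k != j]
--
--         for result, operation in combine_nums(num1, num2):
--             new_nums = remaining_nums + [result]
--             new_operations = operations + [operation]
--             solution = search(target, new_nums, new_operations)
--             if solution:
--                 return solution
--
--     return None
-- ===== SOURCE B (Python) =====
-- from typing import List, Tuple, Optional
-- import itertools
--
-- def combine_nums(a: int, b: int) -> List[Tuple[int, str]]:
--     results = [(a + b, f"{a} + {b} = {a + b}"), (a * b, f"{a} * {b} = {a * b}")]
--     if a <= b:
--         results.append((b - a, f"{b} - {a} = {b - a}"))
--         if a != 0 and b % a == 0: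
--             results.append((b // a, f"{b} / {a} = {b // a}"))
--     else:
--         results.append((a - b, f"{a} - {b} = {a - b}"))
--         if b != 0 and a % b == 0:
--             results.append((a // b, f"{a} / {b} = {a // b}"))
--     return results
--
-- def search(
--     target: int, nums: List[int], operations: List[str] = []
-- ) -> Optional[List[str]]:
--     """Iterative depth-first search with an explicit LIFO stack (same
--     exploration order as the recursive version, so the same first solution)."""
--     stack = [(nums, operations)]
--     while stack:
--         cur_nums, cur_ops = stack.pop()
--         if len(cur_nums) == 1:
--             if cur_nums[0] == target:
--                 return cur_ops
--             continue
--         children = []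
--         for i, j in itertools.combinations(range(len(cur_nums)), 2):
--             a, b = cur_nums[i], cur_nums[j]
--             rest = [cur_nums[k] for k in range(len(cur_nums)) if k != i and k != j]
--             for result, op in combine_nums(a, b):
--                 children.append((rest + [result], cur_ops + [op]))
--         stack.extend(reversed(children))
--     return None
-- ===== Notes on version B (the rewrite author's own statement) =====
-- stated objective: alternative
-- what changed: search's recursive DFS is replaced by an iterative loop over an explicit LIFO stack of (nums, operations) states; children are pushed in reversed order so states are popped in the original exploration order and the identical first solution is returned.
import Mathlib
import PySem

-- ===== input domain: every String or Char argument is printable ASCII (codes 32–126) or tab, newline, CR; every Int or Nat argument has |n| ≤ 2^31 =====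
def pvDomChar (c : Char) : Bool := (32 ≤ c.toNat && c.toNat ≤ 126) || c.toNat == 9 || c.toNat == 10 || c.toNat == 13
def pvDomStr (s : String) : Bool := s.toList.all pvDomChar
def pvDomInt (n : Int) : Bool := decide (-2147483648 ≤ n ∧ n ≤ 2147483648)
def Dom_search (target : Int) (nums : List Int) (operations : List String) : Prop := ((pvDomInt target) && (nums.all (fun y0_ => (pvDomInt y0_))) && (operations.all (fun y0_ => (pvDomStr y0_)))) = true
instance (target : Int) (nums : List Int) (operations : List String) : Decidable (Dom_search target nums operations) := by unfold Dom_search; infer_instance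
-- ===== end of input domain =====

-- B replaces A's recursion by an explicit LIFO stack popped in the same DFS order (same first
-- solution); objective: alternative decomposition, same cost.

-- ===== PORT A =====

-- Python truthiness of an Optional[List[str]]: None and [] are falsy.
def pyTruthy (o : Option (List String)) : Bool :=
  match o with
  | some l => !l.isEmpty
  | none => false

-- combine_nums (shared helper: both Python sources contain the identical function)
def combineNums (a b : Int) : List (Int × String) :=
  let results := [(a + b, PySem.Int.toStr a ++ " + " ++ PySem.Int.toStr b ++ " = " ++ PySem.Int.toStr (a + b)),
                  (a * b, PySem.Int.toStr a ++ " * " ++ PySem.Int.toStr b ++ " = " ++ PySem.Int.toStr (a * b))]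
  if a ≤ b then
    let results := results ++ [(b - a, PySem.Int.toStr b ++ " - " ++ PySem.Int.toStr a ++ " = " ++ PySem.Int.toStr (b - a))]
    if a ≠ 0 ∧ PySem.Int.mod b a = 0 then
      results ++ [(PySem.Int.floordiv b a, PySem.Int.toStr b ++ " / " ++ PySem.Int.toStr a ++ " = " ++ PySem.Int.toStr (PySem.Int.floordiv b a))]
    else results
  else
    let results := results ++ [(a - b, PySem.Int.toStr a ++ " - " ++ PySem.Int.toStr b ++ " = " ++ PySem.Int.toStr (a - b))]
    if b ≠ 0 ∧ PySem.Int.mod a b = 0 then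
      results ++ [(PySem.Int.floordiv a b, PySem.Int.toStr a ++ " / " ++ PySem.Int.toStr b ++ " = " ++ PySem.Int.toStr (PySem.Int.floordiv a b))]
    else results

-- itertools.combinations(range(n), 2), in iteration order (i < j, lexicographic)
def combos (n : Nat) : List (Nat × Nat) :=
  (List.range n).flatMap (fun i => ((List.range n).filter (fun j => i < j)).map (fun j => (i, j)))

-- [nums[k] for k in range(len(nums)) if k != i and k != j]  (identical line in both sources)
def restOf (nums : List Int) (i j : Nat) : List Int :=
  ((List.range nums.length).filter (fun k => k != i && k != j)).map (fun k => nums.getD k 0)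

-- inner 'for result, operation in combine_nums(...)' loop with its early return
def innerLoopA (recf : List Int → List String → Option (List String))
    (remaining : List Int) (ops : List String) : List (Int × String) → Option (List String)
  | [] => none
  | (result, operation) :: rest =>
    let solution := recf (remaining ++ [result]) (ops ++ [operation])
    if pyTruthy solution then solution else innerLoopA recf remaining ops rest

-- outer 'for i, j in itertools.combinations(...)' loop with the propagated early return
def pairLoopA (recf : List Int → List String → Option (List String))
    (nums : List Int) (ops : List String) : List (Nat × Nat) → Option (List String)
  | [] => none
  | (i, j) :: ps =>
    -- indices come from combinations(range(len(nums))), hence always in range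
    let num1 := nums.getD i 0
    let num2 := nums.getD j 0
    match innerLoopA recf (restOf nums i j) ops (combineNums num1 num2) with
    | some s => some s
    | none => pairLoopA recf nums ops ps

def searchCore : Nat → Int → List Int → List String → Option (List String)
  | 0, _, _, _ => none   -- fuel guard only; never reached with the wrapper's fuel
  | fuel + 1, target, nums, ops =>
    if nums.length = 1 then
      match PySem.List.pyGet? nums 0 with   -- nums[0], in range since length = 1
      | some x => if x = target then some ops else none
      | none => none
    else
      pairLoopA (searchCore fuel target) nums ops (combos nums.length)

-- each recursive call shrinks nums by one element, so nums.length + 1 levels of fuel suffice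
def search (target : Int) (nums : List Int) (operations : List String) : Option (List String) :=
  searchCore (nums.length + 1) target nums operations

-- ===== PORT B =====

-- the successor states one popped state generates for one index pair (i, j)
def pairChildren (nums : List Int) (ops : List String) (ij : Nat × Nat) : List (List Int × List String) :=
  let a := nums.getD ij.1 0
  let b := nums.getD ij.2 0
  let rest := restOf nums ij.1 ij.2
  (combineNums a b).map (fun ro => (rest ++ [ro.1], ops ++ [ro.2]))

-- the 'children' list B builds before extending the stack
def childStates (nums : List Int) (ops : List String) : List (List Int × List String) :=
  (combos nums.length).flatMap (pairChildren nums ops)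

-- fuel bound on the number of while-iterations (tree size); totality guard only
def bndFuel : Nat → Nat
  | 0 => 1
  | n + 1 => 1 + 4 * (n + 1) * (n + 1) * bndFuel n

-- the while loop; the Lean list's head is the Python list's end (the stack top), so Python's
-- stack.extend(reversed(children)); stack.pop() becomes prepending children in order
def searchStackCore : Nat → Int → List (List Int × List String) → Option (List String)
  | 0, _, _ => none   -- fuel guard only; never reached with the wrapper's fuel
  | _ + 1, _, [] => none
  | fuel + 1, target, (curNums, curOps) :: rest =>
    if curNums.length = 1 then
      if curNums.getD 0 0 = target then some curOps else searchStackCore fuel target rest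
      -- curNums[0]: in range since length = 1
    else
      searchStackCore fuel target (childStates curNums curOps ++ rest)

def search_alt (target : Int) (nums : List Int) (operations : List String) : Option (List String) :=
  searchStackCore (bndFuel nums.length) target [(nums, operations)]

-- ===== PRECONDITION & SPEC =====
def Spec_search (target : Int) (nums : List Int) (operations : List String) (out : Option (List String)) : Prop := out = search_alt target nums operations
instance (target : Int) (nums : List Int) (operations : List String) (out : Option (List String)) : Decidable (Spec_search target nums operations out) := by unfold Spec_search; infer_instance

-- ===== CLAIM (what is proved, stated in full; the proofs are below) =====
def Claim_equal_search : Prop := ∀ (target : Int) (nums : List Int) (operations : List String), Dom_search target nums operations → Spec_search target nums operations (search target nums operations)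

-- ===== LEMMAS AND PROOFS =====

-- first state whose searchCore result is some (the A-side reading of a stack)
def listFirst (g : List Int → List String → Option (List String)) :
    List (List Int × List String) → Option (List String)
  | [] => none
  | c :: cs =>
    match g c.1 c.2 with
    | some l => some l
    | none => listFirst g cs

-- first state whose result is truthy (the shape of A's loops)
def firstT (g : List Int → List String → Option (List String)) :
    List (List Int × List String) → Option (List String)
  | [] => none
  | c :: cs => if pyTruthy (g c.1 c.2) then g c.1 c.2 else firstT g cs

def stackWeight (stack : List (List Int × List String)) : Nat :=
  (stack.map (fun s => bndFuel s.1.length)).sum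

theorem bndFuel_pos (n : Nat) : 1 ≤ bndFuel n := by
  cases n <;> simp [bndFuel]

theorem combos_mem {n : Nat} {i j : Nat} (h : (i, j) ∈ combos n) : i < j ∧ j < n := by
  simp only [combos, List.mem_flatMap, List.mem_map, List.mem_filter, List.mem_range] at h
  obtain ⟨i', hi', j', ⟨hj', hlt⟩, heq⟩ := h
  obtain ⟨rfl, rfl⟩ := Prod.mk.injEq .. ▸ heq
  simp at hlt
  omega

theorem restOf_length {nums : List Int} {i j : Nat} (hij : i < j) (hj : j < nums.length) :
    (restOf nums i j).length = nums.length - 2 := by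
  have hnd : (List.range nums.length).Nodup := List.nodup_range
  have h1 : (List.range nums.length).filter (fun k => k != i && k != j)
      = ((List.range nums.length).erase i).erase j := by
    rw [hnd.erase_eq_filter, (hnd.filter _).erase_eq_filter, List.filter_filter]
    apply List.filter_congr
    intro k _
    simp [Bool.and_comm]
  have hi : i ∈ List.range nums.length := by simp; omega
  have hjm : j ∈ (List.range nums.length).erase i := by
    apply List.mem_erase_of_ne (by omega) |>.mpr
    simp; omega
  simp only [restOf, List.length_map, h1]
  rw [List.length_erase_of_mem hjm, List.length_erase_of_mem hi]
  simp
  omega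

theorem combineNums_length (a b : Int) : (combineNums a b).length ≤ 4 := by
  simp only [combineNums]
  split_ifs <;> simp

theorem flatMap_length_le {α β : Type} (l : List α) (f : α → List β) (c : Nat)
    (h : ∀ x ∈ l, (f x).length ≤ c) : (l.flatMap f).length ≤ c * l.length := by
  induction l with
  | nil => simp
  | cons x xs ih =>
    simp only [List.flatMap_cons, List.length_append, List.length_cons]
    have h1 := h x (by simp)
    have h2 := ih (fun y hy => h y (by simp [hy]))
    calc (f x).length + (xs.flatMap f).length ≤ c + c * xs.length := by omega
    _ = c * (xs.length + 1) := by ring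

theorem combos_length (n : Nat) : (combos n).length ≤ n * n := by
  have := flatMap_length_le (List.range n)
    (fun i => ((List.range n).filter (fun j => i < j)).map (fun j => (i, j))) n
    (fun i _ => by
      simp only [List.length_map]
      exact le_trans (List.length_filter_le _ _) (by simp))
  simpa [combos] using this

theorem childStates_length (nums : List Int) (ops : List String) :
    (childStates nums ops).length ≤ 4 * (nums.length * nums.length) := by
  have h1 := flatMap_length_le (combos nums.length) (pairChildren nums ops) 4
    (fun ij _ => by simp [pairChildren]; exact combineNums_length _ _)
  have h2 := combos_length nums.length
  calc (childStates nums ops).length ≤ 4 * (combos nums.length).length := h1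
  _ ≤ 4 * (nums.length * nums.length) := by omega

theorem childStates_mem {nums : List Int} {ops : List String} {c : List Int × List String}
    (h : c ∈ childStates nums ops) :
    c.1.length = nums.length - 1 ∧ c.2 ≠ [] ∧ 2 ≤ nums.length := by
  simp only [childStates, List.mem_flatMap] at h
  obtain ⟨⟨i, j⟩, hij, hc⟩ := h
  obtain ⟨hlt, hj⟩ := combos_mem hij
  simp only [pairChildren, List.mem_map] at hc
  obtain ⟨ro, _, rfl⟩ := hc
  have hr := restOf_length hlt hj
  refine ⟨?_, by simp, by omega⟩
  simp [hr]
  omega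

theorem innerLoopA_truthy {g rem ops lst l} (h : innerLoopA g rem ops lst = some l) : l ≠ [] := by
  induction lst with
  | nil => simp [innerLoopA] at h
  | cons x xs ih =>
    obtain ⟨r, op⟩ := x
    simp only [innerLoopA] at h
    split at h
    · next htr =>
      rw [h] at htr
      simp [pyTruthy] at htr
      exact htr
    · exact ih h

theorem pairLoopA_truthy {g nums ops ps l} (h : pairLoopA g nums ops ps = some l) : l ≠ [] := by
  induction ps with
  | nil => simp [pairLoopA] at h
  | cons p ps ih =>
    obtain ⟨i, j⟩ := p
    simp only [pairLoopA] at h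
    split at h
    · next s heq =>
      cases h
      exact innerLoopA_truthy heq
    · exact ih h

theorem searchCore_ne_nil {f t nums ops l} (hops : ops ≠ ([] : List String))
    (h : searchCore f t nums ops = some l) : l ≠ [] := by
  cases f with
  | zero => simp [searchCore] at h
  | succ f' =>
    rw [searchCore] at h
    split at h
    · cases hg : PySem.List.pyGet? nums 0 with
      | none => rw [hg] at h; cases h
      | some x =>
        rw [hg] at h
        have h' : (if x = t then some ops else none) = some l := h
        by_cases hxt : x = t
        · rw [if_pos hxt] at h'; cases h'; exact hops
        · rw [if_neg hxt] at h'; cases h'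
    · exact pairLoopA_truthy h

theorem innerLoopA_congr {g1 g2 : List Int → List String → Option (List String)}
    {rem : List Int} {ops : List String}
    (h : ∀ r op, g1 (rem ++ [r]) (ops ++ [op]) = g2 (rem ++ [r]) (ops ++ [op])) :
    ∀ lst, innerLoopA g1 rem ops lst = innerLoopA g2 rem ops lst := by
  intro lst
  induction lst with
  | nil => rfl
  | cons x xs ih =>
    obtain ⟨r, op⟩ := x
    simp only [innerLoopA, h, ih]

theorem pairLoopA_congr {g1 g2 : List Int → List String → Option (List String)}
    {nums : List Int} {ops : List String}
    (h : ∀ ns os, ns.length + 1 = nums.length → g1 ns os = g2 ns os) :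
    ∀ ps, (∀ p ∈ ps, p ∈ combos nums.length) →
    pairLoopA g1 nums ops ps = pairLoopA g2 nums ops ps := by
  intro ps
  induction ps with
  | nil => intro _; rfl
  | cons p ps ih =>
    intro hps
    obtain ⟨i, j⟩ := p
    obtain ⟨hlt, hj⟩ := combos_mem (hps (i, j) (by simp))
    have hr := restOf_length hlt hj
    simp only [pairLoopA]
    rw [innerLoopA_congr (fun r op =>
        h (restOf nums i j ++ [r]) (ops ++ [op]) (by simp [hr]; omega)),
      ih (fun q hq => hps q (by simp [hq]))]

theorem searchCore_fuel (f : Nat) : ∀ (g : Nat) (t : Int) (nums : List Int) (ops : List String),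
    nums.length < f → nums.length < g → searchCore f t nums ops = searchCore g t nums ops := by
  induction f with
  | zero => intro g t nums ops hf; omega
  | succ f' ih =>
    intro g t nums ops hf hg
    cases g with
    | zero => omega
    | succ g' =>
      simp only [searchCore]
      by_cases h1 : nums.length = 1
      · simp [h1]
      · simp only [h1, if_false]
        apply pairLoopA_congr
        · intro ns os hns
          exact ih g' t ns os (by omega) (by omega)
        · intro p hp; exact hp

theorem innerLoopA_eq_firstT (g : List Int → List String → Option (List String))
    (rem : List Int) (ops : List String) (lst : List (Int × String)) :
    innerLoopA g rem ops lst = firstT g (lst.map (fun ro => (rem ++ [ro.1], ops ++ [ro.2]))) := by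
  induction lst with
  | nil => rfl
  | cons x xs ih => cases x; simp [innerLoopA, firstT, ih]

theorem firstT_append (g : List Int → List String → Option (List String))
    (xs ys : List (List Int × List String)) :
    firstT g (xs ++ ys) = match firstT g xs with
      | some l => some l
      | none => firstT g ys := by
  induction xs with
  | nil => simp [firstT]
  | cons c cs ih =>
    simp only [List.cons_append, firstT]
    by_cases h : pyTruthy (g c.1 c.2) = true
    · simp only [h, if_true]
      cases hg : g c.1 c.2 with
      | none => rw [hg] at h; simp [pyTruthy] at h
      | some l => rfl
    · simp [h, ih]

theorem pairLoopA_eq_firstT (g : List Int → List String → Option (List String))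
    (nums : List Int) (ops : List String) (ps : List (Nat × Nat)) :
    pairLoopA g nums ops ps = firstT g (ps.flatMap (pairChildren nums ops)) := by
  induction ps with
  | nil => rfl
  | cons p ps ih =>
    obtain ⟨i, j⟩ := p
    simp only [pairLoopA, List.flatMap_cons]
    rw [firstT_append]
    have hpc : pairChildren nums ops (i, j)
        = (combineNums (nums.getD i 0) (nums.getD j 0)).map
            (fun ro => (restOf nums i j ++ [ro.1], ops ++ [ro.2])) := rfl
    rw [hpc, ← innerLoopA_eq_firstT]
    cases h : innerLoopA g (restOf nums i j) ops (combineNums (nums.getD i 0) (nums.getD j 0)) with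
    | some s => rfl
    | none => simp [ih]

theorem firstT_eq_listFirst {f' : Nat} (t : Int)
    (cs : List (List Int × List String))
    (h : ∀ c ∈ cs, c.2 ≠ ([] : List String) ∧ c.1.length < f') :
    firstT (searchCore f' t) cs = listFirst (searchCore (f' + 1) t) cs := by
  induction cs with
  | nil => rfl
  | cons c cs ih =>
    obtain ⟨hne, hlt⟩ := h c (by simp)
    simp only [firstT, listFirst]
    rw [searchCore_fuel f' (f' + 1) t c.1 c.2 hlt (by omega)]
    cases hx : searchCore (f' + 1) t c.1 c.2 with
    | none => simp [pyTruthy, ih (fun d hd => h d (by simp [hd]))]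
    | some l =>
      have hl : l ≠ [] := searchCore_ne_nil hne hx
      simp [pyTruthy, hl]

theorem searchCore_eq_listFirst {f : Nat} (t : Int) (nums : List Int) (ops : List String)
    (hne : nums.length ≠ 1) (hf : nums.length < f) :
    searchCore f t nums ops = listFirst (searchCore f t) (childStates nums ops) := by
  cases f with
  | zero => omega
  | succ f' =>
    rw [searchCore]
    simp only [hne, if_false]
    rw [pairLoopA_eq_firstT]
    have : (combos nums.length).flatMap (pairChildren nums ops) = childStates nums ops := rfl
    rw [this]
    apply firstT_eq_listFirst
    intro c hc
    obtain ⟨hlen, hne2, h2⟩ := childStates_mem hc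
    exact ⟨hne2, by omega⟩

theorem listFirst_append (g : List Int → List String → Option (List String))
    (xs ys : List (List Int × List String)) :
    listFirst g (xs ++ ys) = match listFirst g xs with
      | some l => some l
      | none => listFirst g ys := by
  induction xs with
  | nil => simp [listFirst]
  | cons c cs ih =>
    simp only [List.cons_append, listFirst]
    cases g c.1 c.2 with
    | some l => rfl
    | none => simp [ih]

theorem sum_map_le {α : Type} (l : List α) (h : α → Nat) (c : Nat)
    (hb : ∀ x ∈ l, h x ≤ c) : (l.map h).sum ≤ c * l.length := by
  induction l with
  | nil => simp
  | cons x xs ih =>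
    simp only [List.map_cons, List.sum_cons, List.length_cons]
    have := hb x (by simp)
    have := ih (fun y hy => hb y (by simp [hy]))
    calc h x + (xs.map h).sum ≤ c + c * xs.length := by omega
    _ = c * (xs.length + 1) := by ring

theorem sim (fA : Nat) (t : Int) : ∀ (fB : Nat) (stack : List (List Int × List String)),
    (∀ s ∈ stack, s.1.length < fA) → stackWeight stack ≤ fB →
    searchStackCore fB t stack = listFirst (searchCore fA t) stack := by
  intro fB
  induction fB with
  | zero =>
    intro stack hs hw
    cases stack with
    | nil => rfl
    | cons s rest =>
      have := bndFuel_pos s.1.length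
      simp [stackWeight] at hw
      omega
  | succ fB ih =>
    intro stack hs hw
    cases stack with
    | nil => rfl
    | cons s rest =>
      obtain ⟨cn, co⟩ := s
      have hlen : cn.length < fA := by simpa using hs (cn, co) (by simp)
      by_cases h1 : cn.length = 1
      · -- leaf state
        obtain ⟨x, rfl⟩ : ∃ x, cn = [x] := by
          cases cn with
          | nil => simp at h1
          | cons x tl =>
            cases tl with
            | nil => exact ⟨x, rfl⟩
            | cons y tl' => simp at h1
        rw [searchStackCore, if_pos h1]
        cases fA with
        | zero => omega
        | succ fA' =>
          have hrest : stackWeight rest ≤ fB := by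
            simp [stackWeight, bndFuel] at hw ⊢
            omega
          simp only [listFirst]
          rw [searchCore, if_pos h1, PySem.List.pyGet?_zero_cons]
          have hgd : ([x] : List Int).getD 0 0 = x := rfl
          rw [hgd]
          by_cases hx : x = t
          · simp [hx]
          · simp only [hx, if_false]
            exact ih rest (fun d hd => hs d (by simp [hd])) hrest
      · -- internal state
        rw [searchStackCore, if_neg h1]
        have hweq : stackWeight ((cn, co) :: rest) = bndFuel cn.length + stackWeight rest := by
          simp [stackWeight]
        rcases n0 : cn.length with _ | m
        · -- no numbers left: no children
          have hcn : cn = [] := List.length_eq_zero_iff.mp n0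
          subst hcn
          have hch : childStates ([] : List Int) co = [] := rfl
          rw [hch, List.nil_append]
          rw [ih rest (fun d hd => hs d (by simp [hd]))
            (by
              rw [hweq] at hw
              have h0 : bndFuel ([] : List Int).length = 1 := rfl
              omega)]
          simp only [listFirst]
          cases fA with
          | zero => omega
          | succ fA' =>
            have : searchCore (fA' + 1) t [] co = none := rfl
            rw [this]
        · -- at least two numbers: expand into children
          have hch_mem := fun c hc => childStates_mem (nums := cn) (ops := co) (c := c) hc
          have hlens : ∀ d ∈ childStates cn co ++ rest, d.1.length < fA := by
            intro d hd
            rcases List.mem_append.mp hd with hd | hd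
            · have := (hch_mem d hd).1; omega
            · exact hs d (by simp [hd])
          have hwch : (List.map (fun s => bndFuel s.1.length) (childStates cn co)).sum
              ≤ bndFuel m * (4 * (cn.length * cn.length)) := by
            have h1' := sum_map_le (childStates cn co) (fun s => bndFuel s.1.length) (bndFuel m)
              (fun c hc => by
                have hcl := (hch_mem c hc).1
                show bndFuel c.1.length ≤ bndFuel m
                rw [hcl, n0]
                simp)
            have h2' := childStates_length cn co
            calc (List.map (fun s => bndFuel s.1.length) (childStates cn co)).sum
                ≤ bndFuel m * (childStates cn co).length := h1'
              _ ≤ bndFuel m * (4 * (cn.length * cn.length)) :=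
                  Nat.mul_le_mul_left _ h2'
          have hbnd : bndFuel (m + 1) = 1 + 4 * (m + 1) * (m + 1) * bndFuel m := rfl
          have hcomm : 4 * (m + 1) * (m + 1) * bndFuel m
              = bndFuel m * (4 * ((m + 1) * (m + 1))) := by ring
          have hwnew : stackWeight (childStates cn co ++ rest) ≤ fB := by
            rw [hweq, n0] at hw
            rw [hcomm] at hbnd
            rw [n0] at hwch
            simp only [stackWeight, List.map_append, List.sum_append] at hw ⊢
            omega
          rw [ih (childStates cn co ++ rest) hlens hwnew, listFirst_append]
          simp only [listFirst]
          rw [searchCore_eq_listFirst t cn co h1 hlen]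

-- ===== VERDICT (by name: the statement is the Claim_ definition above) =====
theorem search_spec : Claim_equal_search := by
  intro t nums ops _
  unfold Spec_search search search_alt
  have hsim := sim (nums.length + 1) t (bndFuel nums.length) [(nums, ops)]
    (by intro s hs; simp at hs; subst hs; simp)
    (by simp [stackWeight])
  rw [hsim]
  simp only [listFirst]
  cases searchCore (nums.length + 1) t nums ops <;> rfl
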